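-- pv_equiv track=rewrite | github.com/ivengexnce/Space-Explorer-AI-Wellbeing | MAITRI_AI/Pys/report.py | _streaks
-- ===== SOURCE A (Python) =====
-- def _streaks(log: list) -> dict:
--     """Find longest positive and negative streaks."""
--     positive = {"happy", "neutral", "surprise"}
--     best_pos = best_neg = cur_pos = cur_neg = 0
--     for e in log:
--         if e.lower() in positive:
--             cur_pos += 1
--             cur_neg  = 0
--         else:
--             cur_neg += 1
--             cur_pos  = 0
--         best_pos = max(best_pos, cur_pos)
--         best_neg = max(best_neg, cur_neg)
--     return {"longest_positive_streak": best_pos, "longest_negative_streak": best_neg}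
-- ===== SOURCE B (Python) =====
-- def _streaks(log: list) -> dict:
--     """Find longest positive and negative streaks."""
--     positive = {"happy", "neutral", "surprise"}
--     flags = [e.lower() in positive for e in log]
--     # split into maximal runs of equal polarity, then reduce over run lengths
--     runs = []
--     i, n = 0, len(flags)
--     while i < n:
--         j = i + 1
--         while j < n and flags[j] == flags[i]:
--             j += 1
--         runs.append((flags[i], j - i))
--         i = j
--     best_pos = best_neg = 0
--     for f, l in runs:
--         if f:
--             best_pos = max(best_pos, l)
--         else:
--             best_neg = max(best_neg, l)
--     return {"longest_positive_streak": best_pos, "longest_negative_streak": best_neg}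
-- ===== Notes on version B (the rewrite author's own statement) =====
-- stated objective: alternative
-- what changed: B first splits the log into maximal runs of equal polarity and then takes the maximum length among positive runs and among negative runs, instead of A's per-element current/best counter updates.
import Mathlib
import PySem

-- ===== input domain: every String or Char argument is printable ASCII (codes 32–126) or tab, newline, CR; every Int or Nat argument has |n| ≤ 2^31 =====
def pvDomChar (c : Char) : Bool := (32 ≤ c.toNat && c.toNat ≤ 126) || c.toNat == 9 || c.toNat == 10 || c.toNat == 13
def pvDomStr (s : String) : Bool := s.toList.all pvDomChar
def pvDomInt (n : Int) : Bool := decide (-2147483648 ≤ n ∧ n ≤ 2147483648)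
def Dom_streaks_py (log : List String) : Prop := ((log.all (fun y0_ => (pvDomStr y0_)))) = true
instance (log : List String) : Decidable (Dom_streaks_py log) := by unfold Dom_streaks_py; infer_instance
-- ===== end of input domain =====

-- B splits the log into maximal runs of equal polarity and reduces over run lengths,
-- instead of A's per-element current/best counter updates (objective: alternative).


-- ===== PORT A =====
-- e.lower() in positive, shared by both ports (same expression in both Pythons)
def pvIsPositive (e : String) : Bool :=
  PySem.Set.contains (PySem.Set.ofList ["happy", "neutral", "surprise"]) (PySem.Str.lower e)

def streaks_py (log : List String) : List (String × Int) :=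
  let st : Int × Int × Int × Int :=
    log.foldl (fun s e =>
      let (best_pos, best_neg, cur_pos, cur_neg) := s
      if pvIsPositive e then
        (max best_pos (cur_pos + 1), max best_neg 0, cur_pos + 1, 0)
      else
        (max best_pos 0, max best_neg (cur_neg + 1), 0, cur_neg + 1)) (0, 0, 0, 0)
  [("longest_positive_streak", st.1), ("longest_negative_streak", st.2.1)]

-- ===== PORT B =====
-- inner while loop: length of the leading block of `rest` whose flag equals f
def pvRunLen (f : Bool) : List Bool → Nat
  | [] => 0
  | g :: rest => if g == f then pvRunLen f rest + 1 else 0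

theorem pvRunLen_le (f : Bool) (l : List Bool) : pvRunLen f l ≤ l.length := by
  induction l with
  | nil => simp [pvRunLen]
  | cons g rest ih => simp only [pvRunLen]; split <;> simp [ih]


-- outer while loop: the list of maximal runs (flag, length)
def pvRuns : List Bool → List (Bool × Int)
  | [] => []
  | f :: rest =>
    let k := pvRunLen f rest
    (f, (k : Int) + 1) :: pvRuns (rest.drop k)
termination_by l => l.length
decreasing_by
  simp only [List.length_drop, List.length_cons]
  have := pvRunLen_le f rest
  omega

def streaks_py_alt (log : List String) : List (String × Int) :=
  let flags := log.map pvIsPositive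
  let runs := pvRuns flags
  let best : Int × Int :=
    runs.foldl (fun (b : Int × Int) r =>
      if r.1 then (max b.1 r.2, b.2) else (b.1, max b.2 r.2)) (0, 0)
  [("longest_positive_streak", best.1), ("longest_negative_streak", best.2)]

-- ===== PRECONDITION & SPEC =====
def Spec_streaks_py (log : List String) (out : List (String × Int)) : Prop := out = streaks_py_alt log
instance (log : List String) (out : List (String × Int)) : Decidable (Spec_streaks_py log out) := by unfold Spec_streaks_py; infer_instance

-- ===== CLAIM (what is proved, stated in full; the proofs are below) =====
def Claim_equal_streaks_py : Prop := ∀ (log : List String), Dom_streaks_py log → Spec_streaks_py log (streaks_py log)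

-- ===== LEMMAS AND PROOFS =====

-- longest run of `true` in flags, extended at the front by a current count c
def pvBigT (c : Int) : List Bool → Int
  | [] => c
  | true :: rest => pvBigT (c + 1) rest
  | false :: rest => max c (pvBigT 0 rest)

def pvBigN (c : Int) : List Bool → Int
  | [] => c
  | true :: rest => max c (pvBigN 0 rest)
  | false :: rest => pvBigN (c + 1) rest

theorem le_pvBigT (l : List Bool) : ∀ c : Int, c ≤ pvBigT c l := by
  induction l with
  | nil => intro c; simp [pvBigT]
  | cons f rest ih =>
    intro c; cases f
    · simp [pvBigT]
    · simp only [pvBigT]; have := ih (c + 1); omega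

theorem le_pvBigN (l : List Bool) : ∀ c : Int, c ≤ pvBigN c l := by
  induction l with
  | nil => intro c; simp [pvBigN]
  | cons f rest ih =>
    intro c; cases f
    · simp only [pvBigN]; have := ih (c + 1); omega
    · simp [pvBigN]

-- A's fold characterised by pvBigT / pvBigN
theorem foldA_char (log : List String) :
    ∀ (bp bn cp cn : Int), 0 ≤ cp → 0 ≤ cn → cp ≤ bp → cn ≤ bn →
    (log.foldl (fun (s : Int × Int × Int × Int) e =>
      let (best_pos, best_neg, cur_pos, cur_neg) := s
      if pvIsPositive e then (max best_pos (cur_pos + 1), max best_neg 0, cur_pos + 1, 0)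
      else (max best_pos 0, max best_neg (cur_neg + 1), 0, cur_neg + 1)) (bp, bn, cp, cn)).1
      = max bp (pvBigT cp (log.map pvIsPositive))
    ∧ (log.foldl (fun (s : Int × Int × Int × Int) e =>
      let (best_pos, best_neg, cur_pos, cur_neg) := s
      if pvIsPositive e then (max best_pos (cur_pos + 1), max best_neg 0, cur_pos + 1, 0)
      else (max best_pos 0, max best_neg (cur_neg + 1), 0, cur_neg + 1)) (bp, bn, cp, cn)).2.1
      = max bn (pvBigN cn (log.map pvIsPositive)) := by
  induction log with
  | nil => intro bp bn cp cn h1 h2 h3 h4; constructor <;> simp [pvBigT, pvBigN] <;> omega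
  | cons e rest ih =>
    intro bp bn cp cn h1 h2 h3 h4
    simp only [List.map_cons]
    cases hf : pvIsPositive e
    · -- negative element
      have h := ih (max bp 0) (max bn (cn + 1)) 0 (cn + 1) (by omega) (by omega) (by omega) (by omega)
      simp only [List.foldl_cons, hf, Bool.false_eq_true, if_false]
      refine ⟨?_, ?_⟩
      · rw [h.1]; simp only [pvBigT]
        have := le_pvBigT (rest.map pvIsPositive) (0 : Int); omega
      · rw [h.2]; simp only [pvBigN]
        have := le_pvBigN (rest.map pvIsPositive) (cn + 1); omega
    · -- positive element
      have h := ih (max bp (cp + 1)) (max bn 0) (cp + 1) 0 (by omega) (by omega) (by omega) (by omega)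
      simp only [List.foldl_cons, hf, if_true]
      refine ⟨?_, ?_⟩
      · rw [h.1]; simp only [pvBigT]
        have := le_pvBigT (rest.map pvIsPositive) (cp + 1); omega
      · rw [h.2]; simp only [pvBigN]
        have := le_pvBigN (rest.map pvIsPositive) (0 : Int); omega

-- run decomposition lemmas for pvBigT / pvBigN
theorem pvBigT_true_run (rest : List Bool) : ∀ c : Int, 0 ≤ c →
    pvBigT c (true :: rest)
      = max (c + (pvRunLen true rest : Int) + 1) (pvBigT 0 (rest.drop (pvRunLen true rest))) := by
  induction rest with
  | nil => intro c hc; simp [pvBigT, pvRunLen]; omega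
  | cons g r ih =>
    intro c hc
    cases g
    · have := le_pvBigT r (0 : Int)
      simp [pvBigT, pvRunLen]; omega
    · have h := ih (c + 1) (by omega)
      simp only [pvBigT] at h ⊢
      simp only [pvRunLen, BEq.rfl, if_true]
      rw [h]
      simp only [List.drop_succ_cons]
      push_cast; ring_nf

theorem pvBigT_false_run (rest : List Bool) : ∀ c : Int, 0 ≤ c →
    pvBigT c (false :: rest) = max c (pvBigT 0 (rest.drop (pvRunLen false rest))) := by
  induction rest with
  | nil => intro c hc; simp [pvBigT, pvRunLen]
  | cons g r ih =>
    intro c hc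
    cases g
    · have h := ih 0 (le_refl 0)
      simp only [pvBigT] at h ⊢
      simp only [pvRunLen, BEq.rfl, if_true, List.drop_succ_cons]
      rw [h]
      have := le_pvBigT (r.drop (pvRunLen false r)) (0 : Int); omega
    · simp [pvBigT, pvRunLen]

theorem pvBigN_false_run (rest : List Bool) : ∀ c : Int, 0 ≤ c →
    pvBigN c (false :: rest)
      = max (c + (pvRunLen false rest : Int) + 1) (pvBigN 0 (rest.drop (pvRunLen false rest))) := by
  induction rest with
  | nil => intro c hc; simp [pvBigN, pvRunLen]; omega
  | cons g r ih =>
    intro c hc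
    cases g
    · have h := ih (c + 1) (by omega)
      simp only [pvBigN] at h ⊢
      simp only [pvRunLen, BEq.rfl, if_true]
      rw [h]
      simp only [List.drop_succ_cons]
      push_cast; ring_nf
    · have := le_pvBigN r (0 : Int)
      simp [pvBigN, pvRunLen]; omega

theorem pvBigN_true_run (rest : List Bool) : ∀ c : Int, 0 ≤ c →
    pvBigN c (true :: rest) = max c (pvBigN 0 (rest.drop (pvRunLen true rest))) := by
  induction rest with
  | nil => intro c hc; simp [pvBigN, pvRunLen]
  | cons g r ih =>
    intro c hc
    cases g
    · simp [pvBigN, pvRunLen]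
    · have h := ih 0 (le_refl 0)
      simp only [pvBigN] at h ⊢
      simp only [pvRunLen, BEq.rfl, if_true, List.drop_succ_cons]
      rw [h]
      have := le_pvBigN (r.drop (pvRunLen true r)) (0 : Int); omega

-- B's fold over the runs characterised the same way
theorem foldB_char (flags : List Bool) :
    ∀ (bp bn : Int), 0 ≤ bp → 0 ≤ bn →
    ((pvRuns flags).foldl (fun (b : Int × Int) r =>
      if r.1 then (max b.1 r.2, b.2) else (b.1, max b.2 r.2)) (bp, bn))
      = (max bp (pvBigT 0 flags), max bn (pvBigN 0 flags)) := by
  induction flags using pvRuns.induct with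
  | case1 => intro bp bn h1 h2; simp [pvRuns, pvBigT, pvBigN]; omega
  | case2 f rest k ih =>
    intro bp bn h1 h2
    cases f
    · -- a negative run
      have hk : k = pvRunLen false rest := rfl
      rw [hk] at ih
      have h := ih (bp) (max bn ((pvRunLen false rest : Int) + 1)) h1 (by positivity)
      simp only [pvRuns, List.foldl_cons, if_neg, Bool.false_eq_true, not_false_iff]
      rw [h]
      rw [pvBigT_false_run rest 0 (le_refl 0), pvBigN_false_run rest 0 (le_refl 0)]
      have := le_pvBigT (rest.drop (pvRunLen false rest)) (0 : Int)
      simp only [Prod.mk.injEq]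
      exact ⟨by omega, by omega⟩
    · -- a positive run
      have hk : k = pvRunLen true rest := rfl
      rw [hk] at ih
      have h := ih (max bp ((pvRunLen true rest : Int) + 1)) bn (by positivity) h2
      simp only [pvRuns, List.foldl_cons, if_pos]
      rw [h]
      rw [pvBigT_true_run rest 0 (le_refl 0), pvBigN_true_run rest 0 (le_refl 0)]
      have := le_pvBigN (rest.drop (pvRunLen true rest)) (0 : Int)
      simp only [Prod.mk.injEq]
      exact ⟨by omega, by omega⟩

-- ===== VERDICT (by name: the statement is the Claim_ definition above) =====
theorem streaks_py_spec : Claim_equal_streaks_py := by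
  intro log _
  unfold Spec_streaks_py streaks_py streaks_py_alt
  have hA := foldA_char log 0 0 0 0 (le_refl 0) (le_refl 0) (le_refl 0) (le_refl 0)
  have hB := foldB_char (log.map pvIsPositive) 0 0 (le_refl 0) (le_refl 0)
  simp only [hA.1, hA.2, hB]
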